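-- pv_equiv track=rewrite | github.com/technikamateur/robolab | src/testMyPlanet.py | listCleaning
-- ===== SOURCE A (Python) =====
-- from collections import OrderedDict
--
-- def listCleaning(paths):
--     newPath = OrderedDict()
--     for edge in paths:
--         key = (edge[0], edge[1])
--         if key not in newPath:
--             newPath[key] = edge[2]
--         else:
--             value = newPath[key]
--             if edge[2] < value:
--                 newPath[key] = edge[2]
--             else:
--                 pass
--     newPathList = []
--     for key, value in newPath.items():
--         newPathList.append([key[0], key[1], value])
--     return newPathList
-- ===== SOURCE B (Python) =====
-- def listCleaning(paths):
--     # For each edge that is the FIRST occurrence of its (start, end) pair,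
--     # emit [start, end, min weight over ALL edges with that pair].
--     # No dict and no running minimum: a seen-list gate plus a per-key full scan.
--     seen = []
--     result = []
--     for edge in paths:
--         key = (edge[0], edge[1])
--         if key in seen:
--             continue
--         seen.append(key)
--         best = min(f[2] for f in paths if (f[0], f[1]) == key)
--         result.append([edge[0], edge[1], best])
--     return result
-- ===== Notes on version B (the rewrite author's own statement) =====
-- stated objective: alternative
-- what changed: B drops the dict and the running-minimum branch entirely: it keeps a seen-list of endpoint pairs and, for each first occurrence of a pair, computes the minimum weight by a full scan of the input (min over a filtered generator), trading O(n) dict updates for an O(n^2) but dict-free two-level scan.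
import Mathlib
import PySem

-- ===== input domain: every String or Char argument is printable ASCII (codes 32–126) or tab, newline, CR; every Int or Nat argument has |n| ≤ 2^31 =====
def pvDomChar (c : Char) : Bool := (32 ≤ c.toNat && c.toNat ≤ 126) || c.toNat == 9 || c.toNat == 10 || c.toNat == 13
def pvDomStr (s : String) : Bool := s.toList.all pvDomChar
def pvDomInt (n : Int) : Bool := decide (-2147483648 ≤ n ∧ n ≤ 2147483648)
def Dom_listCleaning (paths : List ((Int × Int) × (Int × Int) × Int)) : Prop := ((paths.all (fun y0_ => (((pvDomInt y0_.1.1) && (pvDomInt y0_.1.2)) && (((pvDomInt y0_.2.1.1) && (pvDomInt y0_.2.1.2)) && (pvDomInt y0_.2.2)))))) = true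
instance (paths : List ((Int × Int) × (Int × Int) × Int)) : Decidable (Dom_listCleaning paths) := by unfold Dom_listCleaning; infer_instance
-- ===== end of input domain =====

-- B drops the dict and the running minimum: a seen-list gates first occurrences of each
-- endpoint pair, and the weight is min over a full scan of the input per pair (objective: alternative).


-- ===== PORT A =====
-- one step of A's loop: running minimum per (edge[0], edge[1])
def pvStepA (d : PySem.Dict ((Int × Int) × (Int × Int)) Int) (edge : (Int × Int) × (Int × Int) × Int) :
    PySem.Dict ((Int × Int) × (Int × Int)) Int :=
  let key := (edge.1, edge.2.1)
  if ¬ (d.contains key = true) then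
    d.insert key edge.2.2
  else
    let value := d.getD key 0   -- newPath[key]; key is present here, so the default is never used
    if edge.2.2 < value then d.insert key edge.2.2 else d

def listCleaning (paths : List ((Int × Int) × (Int × Int) × Int)) : List ((Int × Int) × (Int × Int) × Int) :=
  (paths.foldl pvStepA PySem.Dict.empty).items.foldl (fun acc kv => acc ++ [(kv.1.1, kv.1.2, kv.2)]) []

-- ===== PORT B =====
-- the (start, end) pair an edge is keyed on
def pvKey (e : (Int × Int) × (Int × Int) × Int) : (Int × Int) × (Int × Int) := (e.1, e.2.1)

-- one step of B's loop over (seen, result): skip a seen key, else record it and scan the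
-- whole input for the minimum weight of that key (min over a nonempty filter; default unused)
def pvStepB (paths : List ((Int × Int) × (Int × Int) × Int))
    (st : List ((Int × Int) × (Int × Int)) × List ((Int × Int) × (Int × Int) × Int))
    (edge : (Int × Int) × (Int × Int) × Int) :
    List ((Int × Int) × (Int × Int)) × List ((Int × Int) × (Int × Int) × Int) :=
  let key := pvKey edge
  if key ∈ st.1 then st
  else
    (st.1 ++ [key],
     st.2 ++ [(edge.1, edge.2.1,
       PySem.List.minD ((paths.filter (fun f => pvKey f = key)).map (·.2.2)) (fun x => x) 0)])

def listCleaning_alt (paths : List ((Int × Int) × (Int × Int) × Int)) : List ((Int × Int) × (Int × Int) × Int) :=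
  (paths.foldl (pvStepB paths) ([], [])).2

-- ===== PRECONDITION & SPEC =====
def Spec_listCleaning (paths : List ((Int × Int) × (Int × Int) × Int)) (out : List ((Int × Int) × (Int × Int) × Int)) : Prop := out = listCleaning_alt paths
instance (paths : List ((Int × Int) × (Int × Int) × Int)) (out : List ((Int × Int) × (Int × Int) × Int)) : Decidable (Spec_listCleaning paths out) := by unfold Spec_listCleaning; infer_instance

-- ===== CLAIM (what is proved, stated in full; the proofs are below) =====
def Claim_equal_listCleaning : Prop := ∀ (paths : List ((Int × Int) × (Int × Int) × Int)), Dom_listCleaning paths → Spec_listCleaning paths (listCleaning paths)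

-- ===== LEMMAS AND PROOFS =====

-- the weights filed under a given key
def pvWeights (paths : List ((Int × Int) × (Int × Int) × Int)) (k : (Int × Int) × (Int × Int)) : List Int :=
  (paths.filter (fun e => pvKey e = k)).map (·.2.2)

-- the output row B emits for a key
def pvF (paths : List ((Int × Int) × (Int × Int) × Int)) (k : (Int × Int) × (Int × Int)) :
    (Int × Int) × (Int × Int) × Int :=
  (k.1, k.2, PySem.List.minD (pvWeights paths k) (fun x => x) 0)

-- the keys B's loop newly appends to a seen-list s, in order
def pvDiffKeys : List ((Int × Int) × (Int × Int)) → List ((Int × Int) × (Int × Int)) → List ((Int × Int) × (Int × Int))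
  | [], _ => []
  | k :: t, s => if k ∈ s then pvDiffKeys t s else k :: pvDiffKeys t (s ++ [k])

-- one step of A's loop, seen through get?: it is exactly min?'s folding step on the filed weight
lemma pvStepA_get? (d : PySem.Dict ((Int × Int) × (Int × Int)) Int)
    (e : (Int × Int) × (Int × Int) × Int) (k : (Int × Int) × (Int × Int)) :
    (pvStepA d e).get? k =
      if pvKey e = k then
        (match d.get? k with
          | none => some e.2.2
          | some m => if e.2.2 < m then some e.2.2 else some m)
      else d.get? k := by
  unfold pvStepA pvKey
  by_cases hc : d.contains (e.1, e.2.1) = true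
  · have hs := (PySem.Dict.contains_eq_isSome_get? d (e.1, e.2.1)) ▸ hc
    rcases ho : d.get? (e.1, e.2.1) with _ | v
    · simp [ho] at hs
    · have hv : d.getD (e.1, e.2.1) 0 = v := PySem.Dict.getD_of_get?_eq_some d 0 ho
      by_cases hk : (e.1, e.2.1) = k
      · subst hk
        simp [hc, hv, ho]
        split_ifs with h <;> simp [ho]
      · simp [hc, hv, hk]
        split_ifs with h
        · exact PySem.Dict.get?_insert_of_ne d _ (fun hkk => hk hkk.symm)
        · rfl
  · have hn : d.get? (e.1, e.2.1) = none := by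
      rw [PySem.Dict.contains_eq_isSome_get?] at hc
      rcases ho : d.get? (e.1, e.2.1) with _ | v
      · rfl
      · simp [ho] at hc
    by_cases hk : (e.1, e.2.1) = k
    · subst hk; simp [hc, hn]
    · simp [hc, hk, PySem.Dict.get?_insert_of_ne d _ (fun hkk => hk hkk.symm)]

-- A's whole loop, seen through get?: it folds min?'s step over the weights filed under k
lemma foldA_get? (paths : List ((Int × Int) × (Int × Int) × Int))
    (d : PySem.Dict ((Int × Int) × (Int × Int)) Int) (k : (Int × Int) × (Int × Int)) :
    (paths.foldl pvStepA d).get? k =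
      (pvWeights paths k).foldl
        (fun acc x => match acc with
          | none => some x
          | some m => if x < m then some x else some m) (d.get? k) := by
  induction paths generalizing d with
  | nil => rfl
  | cons e t ih =>
    simp only [List.foldl_cons]
    rw [ih]
    by_cases hk : pvKey e = k
    · simp [pvWeights, pvKey] at hk ⊢
      simp [pvStepA_get? d e k, pvKey, hk]
    · have : (pvStepA d e).get? k = d.get? k := by rw [pvStepA_get?, if_neg hk]
      rw [this]
      simp [pvWeights, pvKey] at hk ⊢
      simp [hk]

-- hence A's dict at key k holds min(weights) — minD's value on the same bucket
lemma foldA_getD (paths : List ((Int × Int) × (Int × Int) × Int)) (k : (Int × Int) × (Int × Int)) :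
    (paths.foldl pvStepA PySem.Dict.empty).getD k 0 =
      PySem.List.minD (pvWeights paths k) (fun x => x) 0 := by
  rw [PySem.Dict.getD_eq_get?_getD, foldA_get?, PySem.Dict.get?_empty]
  simp only [PySem.List.minD, PySem.List.min?]
  congr 1
  refine List.foldl_ext _ _ none (fun acc w _ => ?_)
  cases acc <;> rfl

-- one step of A's loop adds its key to the key set
lemma pvStepA_keys (d : PySem.Dict ((Int × Int) × (Int × Int)) Int)
    (e : (Int × Int) × (Int × Int) × Int) :
    (pvStepA d e).keys = PySem.Set.add d.keys (pvKey e) := by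
  unfold pvStepA pvKey
  by_cases hc : d.contains (e.1, e.2.1) = true
  · have hm : (e.1, e.2.1) ∈ d.keys := (PySem.Dict.contains_iff_mem_keys d _).mp hc
    simp [hc, PySem.Set.add_of_mem hm]
    split_ifs with h
    · exact PySem.Dict.keys_insert_of_contains d _ hc
    · rfl
  · have hm : (e.1, e.2.1) ∉ d.keys := fun h => hc ((PySem.Dict.contains_iff_mem_keys d _).mpr h)
    simp [hc, PySem.Set.add_of_not_mem hm,
      PySem.Dict.keys_insert_of_not_contains d _ (by simpa using hc)]

-- A's key set is the first-occurrence ordered set of the edges' keys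
lemma foldA_keys (paths : List ((Int × Int) × (Int × Int) × Int)) :
    (paths.foldl pvStepA PySem.Dict.empty).keys = PySem.Set.ofList (paths.map pvKey) := by
  suffices h : ∀ d : PySem.Dict ((Int × Int) × (Int × Int)) Int,
      (paths.foldl pvStepA d).keys = PySem.Set.update d.keys (paths.map pvKey) by
    rw [h PySem.Dict.empty]
    simpa using PySem.Set.update_empty (paths.map pvKey)
  induction paths with
  | nil => intro d; rfl
  | cons e t ih =>
    intro d
    simp only [List.foldl_cons, List.map_cons]
    rw [ih, pvStepA_keys, PySem.Set.update_cons]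

-- B's loop invariant: seen is the set-update of s, result gains the fresh keys' rows in order
lemma foldB_invariant (paths l : List ((Int × Int) × (Int × Int) × Int))
    (s : List ((Int × Int) × (Int × Int))) (r : List ((Int × Int) × (Int × Int) × Int)) :
    l.foldl (pvStepB paths) (s, r) =
      (PySem.Set.update s (l.map pvKey),
       r ++ (pvDiffKeys (l.map pvKey) s).map (pvF paths)) := by
  induction l generalizing s r with
  | nil => simp [PySem.Set.update, pvDiffKeys]
  | cons e t ih =>
    simp only [List.foldl_cons, List.map_cons, PySem.Set.update_cons]
    by_cases hm : pvKey e ∈ s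
    · have hstep : pvStepB paths (s, r) e = (s, r) := by
        unfold pvStepB; simp [hm]
      rw [hstep, ih, PySem.Set.add_of_mem hm]
      simp [pvDiffKeys, hm]
    · have hstep : pvStepB paths (s, r) e =
          (s ++ [pvKey e], r ++ [pvF paths (pvKey e)]) := by
        unfold pvStepB; simp [hm]; rfl
      rw [hstep, ih, PySem.Set.add_of_not_mem hm]
      simp [pvDiffKeys, hm]

-- the fresh keys appended onto s make exactly the set-update of s
lemma update_eq_append_diffKeys (ks : List ((Int × Int) × (Int × Int)))
    (s : List ((Int × Int) × (Int × Int))) :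
    PySem.Set.update s ks = s ++ pvDiffKeys ks s := by
  induction ks generalizing s with
  | nil => simp [PySem.Set.update, pvDiffKeys]
  | cons k t ih =>
    rw [PySem.Set.update_cons]
    by_cases hm : k ∈ s
    · rw [PySem.Set.add_of_mem hm, ih]
      simp [pvDiffKeys, hm]
    · rw [PySem.Set.add_of_not_mem hm, ih]
      simp [pvDiffKeys, hm]

-- hence with an empty seen-list B visits exactly the first occurrences, in order
lemma diffKeys_nil (ks : List ((Int × Int) × (Int × Int))) :
    pvDiffKeys ks [] = PySem.Set.ofList ks := by
  have h := update_eq_append_diffKeys ks []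
  rw [PySem.Set.update_nil_left] at h
  simpa using h.symm

-- B's result in closed form
lemma listCleaning_alt_eq (paths : List ((Int × Int) × (Int × Int) × Int)) :
    listCleaning_alt paths = (PySem.Set.ofList (paths.map pvKey)).map (pvF paths) := by
  unfold listCleaning_alt
  rw [foldB_invariant, diffKeys_nil]
  simp

-- ===== VERDICT (by name: the statement is the Claim_ definition above) =====
theorem listCleaning_spec : Claim_equal_listCleaning := by
  intro paths _
  unfold Spec_listCleaning listCleaning
  rw [PySem.List.foldl_append_singleton_eq_map
    (fun kv : ((Int × Int) × (Int × Int)) × Int => (kv.1.1, kv.1.2, kv.2))]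
  have hkA := foldA_keys paths
  have hndA : (paths.foldl pvStepA PySem.Dict.empty).keys.Nodup := by
    rw [hkA]; exact PySem.Set.nodup_ofList _
  rw [PySem.Dict.items_eq_map_keys _ hndA 0, hkA, listCleaning_alt_eq]
  simp only [List.nil_append, List.map_map]
  refine List.map_congr_left ?_
  intro k _
  simp only [Function.comp_apply, pvF]
  rw [foldA_getD]
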